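-- pv_equiv track=rewrite | github.com/zaids06/Python-DSA | recursion_practice_problems/CheckAB.py | check
-- ===== SOURCE A (Python) =====
-- def check(string):
--     length=len(string)
--     if length==0:
--         return True
--     elif length>=3 and string[:3]=="abb":
--         return check(string[3:])
--     elif length>=2 and string[:2]=="aa":
--         return check(string[1:])
--     elif length==1 and string[0]=='a':
--         return True
--     else:
--         return False
-- ===== SOURCE B (Python) =====
-- def check(string):
--     i, n = 0, len(string)
--     while n - i >= 2:
--         if string.startswith("abb", i):
--             i += 3
--         elif string[i] == 'a' and string[i + 1] == 'a':
--             i += 1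
--         else:
--             return False
--     return i == n or string[i] == 'a'
-- ===== Notes on version B (the rewrite author's own statement) =====
-- stated objective: faster
-- what changed: Replaced A's recursion on string slices (each step copies the remaining suffix, and the aa-rule advances by one character) with a single iterative left-to-right scan keeping only an index pointer, so no substring is ever built.
import Mathlib
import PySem

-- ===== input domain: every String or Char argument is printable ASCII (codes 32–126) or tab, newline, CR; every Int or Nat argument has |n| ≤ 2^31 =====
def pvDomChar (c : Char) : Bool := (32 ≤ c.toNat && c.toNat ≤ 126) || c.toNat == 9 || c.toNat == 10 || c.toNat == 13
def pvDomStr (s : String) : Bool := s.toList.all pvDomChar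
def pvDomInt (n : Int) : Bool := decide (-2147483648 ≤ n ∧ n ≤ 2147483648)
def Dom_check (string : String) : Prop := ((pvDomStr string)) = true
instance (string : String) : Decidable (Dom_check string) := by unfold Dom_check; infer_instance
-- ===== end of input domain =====

-- B replaces A's recursive string-slicing with a single left-to-right index scan (no copies): alternative decomposition, O(n) vs A's O(n^2) slicing.


-- ===== PORT A =====
-- A's recursion, on the list side (string[:k], string[k:] are PySem slices; string[0] is in range by the guard length = 1)
def checkA (cs : List Char) : Bool :=
  if cs.length = 0 then true
  else if 3 ≤ cs.length ∧ PySem.List.slice cs none (some 3) = "abb".toList then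
    checkA (PySem.List.slice cs (some 3) none)
  else if 2 ≤ cs.length ∧ PySem.List.slice cs none (some 2) = "aa".toList then
    checkA (PySem.List.slice cs (some 1) none)
  else if cs.length = 1 ∧ cs.getD 0 ' ' = 'a' then true
  else false
termination_by cs.length
decreasing_by
  · simp [PySem.List.slice_from]; omega
  · simp [PySem.List.slice_from]; omega

def check (string : String) : Bool := checkA string.toList

-- ===== PORT B =====
-- Source B's while-loop: index pointer i, no slicing; string[i] is in range by the guards
def loopB (s : List Char) (n i : Nat) : Bool :=
  if 2 ≤ n - i then
    if i + 3 ≤ n ∧ s.getD i ' ' = 'a' ∧ s.getD (i+1) ' ' = 'b' ∧ s.getD (i+2) ' ' = 'b' then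
      loopB s n (i+3)
    else if s.getD i ' ' = 'a' ∧ s.getD (i+1) ' ' = 'a' then
      loopB s n (i+1)
    else false
  else (i = n || s.getD i ' ' = 'a')
termination_by n - i

def check_alt (string : String) : Bool := loopB string.toList string.toList.length 0

-- ===== PRECONDITION & SPEC =====
def Spec_check (string : String) (out : Bool) : Prop := out = check_alt string
instance (string : String) (out : Bool) : Decidable (Spec_check string out) := by unfold Spec_check; infer_instance

-- ===== CLAIM (what is proved, stated in full; the proofs are below) =====
def Claim_equal_check : Prop := ∀ (string : String), Dom_check string → Spec_check string (check string)

-- ===== LEMMAS AND PROOFS =====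

theorem loopB_eq_checkA_aux (s : List Char) :
    ∀ (k i : Nat), i ≤ s.length → s.length - i ≤ k → loopB s s.length i = checkA (s.drop i) := by
  intro k
  induction k with
  | zero =>
    intro i hi hk
    have hin : i = s.length := by omega
    subst hin
    rw [loopB, checkA]
    simp
  | succ k ih =>
    intro i hi hk
    have lenD : (s.drop i).length = s.length - i := List.length_drop
    by_cases h2 : 2 ≤ s.length - i
    · -- at least two characters remain
      have hi0 : i < s.length := by omega
      have hi1 : i + 1 < s.length := by omega
      have g0 : s.getD i ' ' = s[i] := List.getD_eq_getElem _ _ hi0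
      have g1 : s.getD (i+1) ' ' = s[i+1] := List.getD_eq_getElem _ _ hi1
      have hd0 : s.drop i = s[i] :: s.drop (i + 1) := List.drop_eq_getElem_cons hi0
      have hd1 : s.drop (i + 1) = s[i+1] :: s.drop (i + 2) := List.drop_eq_getElem_cons hi1
      have drop1 : PySem.List.slice (s.drop i) (some 1) none = s.drop (i+1) := by
        rw [PySem.List.slice_from _ (a := 1) (by norm_num)]
        simp [List.drop_drop]
      have take2 : PySem.List.slice (s.drop i) none (some 2) = [s[i], s[i+1]] := by
        rw [PySem.List.slice_to _ (b := 2) (by norm_num)]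
        rw [hd0, hd1]
        rfl
      rw [loopB, checkA, if_pos h2, if_neg (by omega : ¬ (s.drop i).length = 0)]
      by_cases h3 : i + 3 ≤ s.length
      · -- room for "abb"
        have hi2 : i + 2 < s.length := by omega
        have g2 : s.getD (i+2) ' ' = s[i+2] := List.getD_eq_getElem _ _ hi2
        have hd2 : s.drop (i + 2) = s[i+2] :: s.drop (i + 3) := List.drop_eq_getElem_cons hi2
        have take3 : PySem.List.slice (s.drop i) none (some 3) = [s[i], s[i+1], s[i+2]] := by
          rw [PySem.List.slice_to _ (b := 3) (by norm_num)]
          rw [hd0, hd1, hd2]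
          rfl
        have drop3 : PySem.List.slice (s.drop i) (some 3) none = s.drop (i+3) := by
          rw [PySem.List.slice_from _ (a := 3) (by norm_num)]
          simp [List.drop_drop]
        by_cases habb : s[i] = 'a' ∧ s[i+1] = 'b' ∧ s[i+2] = 'b'
        · rw [if_pos (show i + 3 ≤ s.length ∧ s.getD i ' ' = 'a' ∧ s.getD (i+1) ' ' = 'b' ∧ s.getD (i+2) ' ' = 'b' by
                rw [g0, g1, g2]; exact ⟨h3, habb⟩),
              if_pos (show 3 ≤ (s.drop i).length ∧ PySem.List.slice (s.drop i) none (some 3) = "abb".toList by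
                rw [take3, habb.1, habb.2.1, habb.2.2]; exact ⟨by omega, rfl⟩),
              drop3]
          exact ih (i+3) (by omega) (by omega)
        · rw [if_neg (show ¬ (i + 3 ≤ s.length ∧ s.getD i ' ' = 'a' ∧ s.getD (i+1) ' ' = 'b' ∧ s.getD (i+2) ' ' = 'b') by
                rw [g0, g1, g2]; exact fun h => habb h.2),
              if_neg (show ¬ (3 ≤ (s.drop i).length ∧ PySem.List.slice (s.drop i) none (some 3) = "abb".toList) by
                rw [take3]; rintro ⟨-, h⟩
                simp only [show "abb".toList = ['a','b','b'] from rfl, List.cons.injEq, and_true] at h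
                exact habb h)]
          by_cases haa : s[i] = 'a' ∧ s[i+1] = 'a'
          · rw [if_pos (show s.getD i ' ' = 'a' ∧ s.getD (i+1) ' ' = 'a' by rw [g0, g1]; exact haa),
                if_pos (show 2 ≤ (s.drop i).length ∧ PySem.List.slice (s.drop i) none (some 2) = "aa".toList by
                  rw [take2, haa.1, haa.2]; exact ⟨by omega, rfl⟩),
                drop1]
            exact ih (i+1) (by omega) (by omega)
          · rw [if_neg (show ¬ (s.getD i ' ' = 'a' ∧ s.getD (i+1) ' ' = 'a') by rw [g0, g1]; exact haa),
                if_neg (show ¬ (2 ≤ (s.drop i).length ∧ PySem.List.slice (s.drop i) none (some 2) = "aa".toList) by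
                  rw [take2]; rintro ⟨-, h⟩
                  simp only [show "aa".toList = ['a','a'] from rfl, List.cons.injEq, and_true] at h
                  exact haa h),
                if_neg (by omega : ¬ ((s.drop i).length = 1 ∧ (s.drop i).getD 0 ' ' = 'a'))]
      · -- exactly two characters remain: no room for "abb"
        rw [if_neg (show ¬ (i + 3 ≤ s.length ∧ s.getD i ' ' = 'a' ∧ s.getD (i+1) ' ' = 'b' ∧ s.getD (i+2) ' ' = 'b') by
              rintro ⟨h, -⟩; omega),
            if_neg (by omega : ¬ (3 ≤ (s.drop i).length ∧ PySem.List.slice (s.drop i) none (some 3) = "abb".toList))]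
        by_cases haa : s[i] = 'a' ∧ s[i+1] = 'a'
        · rw [if_pos (show s.getD i ' ' = 'a' ∧ s.getD (i+1) ' ' = 'a' by rw [g0, g1]; exact haa),
              if_pos (show 2 ≤ (s.drop i).length ∧ PySem.List.slice (s.drop i) none (some 2) = "aa".toList by
                rw [take2, haa.1, haa.2]; exact ⟨by omega, rfl⟩),
              drop1]
          exact ih (i+1) (by omega) (by omega)
        · rw [if_neg (show ¬ (s.getD i ' ' = 'a' ∧ s.getD (i+1) ' ' = 'a') by rw [g0, g1]; exact haa),
              if_neg (show ¬ (2 ≤ (s.drop i).length ∧ PySem.List.slice (s.drop i) none (some 2) = "aa".toList) by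
                rw [take2]; rintro ⟨-, h⟩
                simp only [show "aa".toList = ['a','a'] from rfl, List.cons.injEq, and_true] at h
                exact haa h),
              if_neg (by omega : ¬ ((s.drop i).length = 1 ∧ (s.drop i).getD 0 ' ' = 'a'))]
    · -- fewer than two characters remain
      rw [loopB, if_neg h2]
      by_cases hin : i = s.length
      · subst hin
        rw [checkA]
        simp
      · have hi0 : i < s.length := by omega
        have g0 : s.getD i ' ' = s[i] := List.getD_eq_getElem _ _ hi0
        have hd0 : s.drop i = s[i] :: s.drop (i + 1) := List.drop_eq_getElem_cons hi0
        rw [checkA,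
            if_neg (by omega : ¬ (s.drop i).length = 0),
            if_neg (by omega : ¬ (3 ≤ (s.drop i).length ∧ PySem.List.slice (s.drop i) none (some 3) = "abb".toList)),
            if_neg (by omega : ¬ (2 ≤ (s.drop i).length ∧ PySem.List.slice (s.drop i) none (some 2) = "aa".toList))]
        by_cases hc : s[i] = 'a'
        · rw [if_pos (show (s.drop i).length = 1 ∧ (s.drop i).getD 0 ' ' = 'a' by
              exact ⟨by omega, by rw [hd0]; exact hc⟩)]
          simp [hin, List.getElem?_eq_getElem hi0, hc]
        · rw [if_neg (show ¬ ((s.drop i).length = 1 ∧ (s.drop i).getD 0 ' ' = 'a') by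
              rintro ⟨-, h⟩; rw [hd0] at h; exact hc h)]
          simp [hin, List.getElem?_eq_getElem hi0, hc]

theorem loopB_eq_checkA (s : List Char) (i : Nat) (hi : i ≤ s.length) :
    loopB s s.length i = checkA (s.drop i) :=
  loopB_eq_checkA_aux s (s.length - i) i hi le_rfl

-- ===== VERDICT (by name: the statement is the Claim_ definition above) =====
theorem check_spec : Claim_equal_check := by
  intro string _
  unfold Spec_check check check_alt
  rw [loopB_eq_checkA _ 0 (Nat.zero_le _), List.drop_zero]
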